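-- pv_equiv track=rewrite | github.com/sunkyuj/ps | 프로그래머스/4/43236. 징검다리/징검다리.py | check
-- ===== SOURCE A (Python) =====
-- def check(val, rocks, n, dist):
--     # 각 바위 사이 거리 구하는데, val 보다 작으면 돌 치우고 n-=1, n 남으면 성공
--     prev = 0
--     end = dist
--     removed = set()
--     for rock in rocks:
--         diff = rock - prev
--         if diff < val: # 돌 삭제
--             n -= 1
--             removed.add(rock)
--         else: # pass
--             prev = rock
--
--
--     # 만약 막돌 치웠는데도 작으면
--     if end-prev < val:
--         for i in range(len(rocks)-1,-1,-1):
--             rock = rocks[i]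
--             if rock in removed:
--                 continue
--
--             if end - rock < val:
--                 n -= 1
--             else:
--                 break
--
--     return n >= 0
-- ===== SOURCE B (Python) =====
-- def check(val, rocks, n, dist):
--     prev = 0
--     chain = 0  # length of the current trailing run of kept rocks r with dist - r < val
--     for rock in rocks:
--         if rock - prev < val:
--             n -= 1
--         else:
--             prev = rock
--             chain = chain + 1 if dist - rock < val else 0
--     return n - chain >= 0
-- ===== Notes on version B (the rewrite author's own statement) =====
-- stated objective: simpler
-- what changed: B collapses A's two passes (forward greedy with a removed-set, then a backward index scan with continue/break) into one forward pass with O(1) state: a counter of the current trailing run of kept rocks closer than val to dist replaces both the set and the whole second pass (no set hashing, no second scan).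
-- outside the precondition, e.g. on check(3, [2, 5, 5], 2, 7): A returns True, B returns False
import Mathlib
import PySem

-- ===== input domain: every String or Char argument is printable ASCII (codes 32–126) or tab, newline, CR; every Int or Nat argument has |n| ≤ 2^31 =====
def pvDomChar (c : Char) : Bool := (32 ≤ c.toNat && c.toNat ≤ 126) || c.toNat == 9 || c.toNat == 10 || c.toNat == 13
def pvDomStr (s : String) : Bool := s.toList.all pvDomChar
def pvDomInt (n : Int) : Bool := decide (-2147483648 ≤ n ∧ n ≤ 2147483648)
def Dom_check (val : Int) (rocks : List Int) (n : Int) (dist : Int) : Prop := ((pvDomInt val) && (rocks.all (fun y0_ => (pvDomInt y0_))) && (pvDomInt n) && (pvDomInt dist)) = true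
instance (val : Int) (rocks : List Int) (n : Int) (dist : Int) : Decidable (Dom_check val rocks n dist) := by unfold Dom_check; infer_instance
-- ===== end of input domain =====

-- B replaces A's two passes (removed-set + backward continue/break scan) by ONE forward pass
-- with O(1) state: a counter of the current trailing run of kept rocks within val of dist.

-- ===== PORT A =====
-- loop body of A's forward for-loop (state: prev, n, removed)
def stepA (val : Int) (st : Int × Int × PySem.Set Int) (rock : Int) : Int × Int × PySem.Set Int :=
  if rock - st.1 < val then (st.1, st.2.1 - 1, PySem.Set.add st.2.2 rock)
  else (rock, st.2.1, st.2.2)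

-- A's backward for-loop over range(len(rocks)-1,-1,-1) with continue (rock in removed) and break,
-- written as recursion over rocks.reverse
def checkBack (val : Int) (dist : Int) (removed : PySem.Set Int) : List Int → Int → Int
  | [], n => n
  | r :: rest, n =>
    if PySem.Set.contains removed r then checkBack val dist removed rest n
    else if dist - r < val then checkBack val dist removed rest (n - 1)
    else n

def check (val : Int) (rocks : List Int) (n : Int) (dist : Int) : Bool :=
  let s := rocks.foldl (stepA val) (0, n, (PySem.Set.empty : PySem.Set Int))
  let n' := if dist - s.1 < val then checkBack val dist s.2.2 rocks.reverse s.2.1 else s.2.1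
  decide (n' ≥ 0)

-- ===== PORT B =====
-- loop body of B's single for-loop (state: prev, n, chain)
def stepC (val : Int) (dist : Int) (st : Int × Int × Int) (rock : Int) : Int × Int × Int :=
  if rock - st.1 < val then (st.1, st.2.1 - 1, st.2.2)
  else (rock, st.2.1, if dist - rock < val then st.2.2 + 1 else 0)

def check_alt (val : Int) (rocks : List Int) (n : Int) (dist : Int) : Bool :=
  let s := rocks.foldl (stepC val dist) (0, n, 0)
  decide (s.2.1 - s.2.2 ≥ 0)

-- ===== PRECONDITION & SPEC =====
-- Pre_ excludes rock lists with duplicate values: there A's value-based removed-set makes the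
-- backward pass skip a rock that was actually kept, an accident of the set representation on
-- inputs the stepping-stones problem never produces; B treats each occurrence separately.
def Pre_check (val : Int) (rocks : List Int) (n : Int) (dist : Int) : Prop := rocks.Nodup
instance (val : Int) (rocks : List Int) (n : Int) (dist : Int) : Decidable (Pre_check val rocks n dist) := by unfold Pre_check; infer_instance

def pvWitness_check : Int × List Int × Int × Int := (2, [1, 3, 6], 1, 8)

def Spec_check (val : Int) (rocks : List Int) (n : Int) (dist : Int) (out : Bool) : Prop := out = check_alt val rocks n dist
instance (val : Int) (rocks : List Int) (n : Int) (dist : Int) (out : Bool) : Decidable (Spec_check val rocks n dist out) := by unfold Spec_check; infer_instance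

-- ===== CLAIM (what is proved, stated in full; the proofs are below) =====
def Claim_equal_check : Prop := ∀ (val : Int) (rocks : List Int) (n : Int) (dist : Int), Dom_check val rocks n dist → Pre_check val rocks n dist → Spec_check val rocks n dist (check val rocks n dist)

-- ===== LEMMAS AND PROOFS =====

-- proof-only intermediate: the forward pass recording the kept rocks head-first
def stepB (val : Int) (st : Int × Int × List Int) (rock : Int) : Int × Int × List Int :=
  if rock - st.1 ≥ val then (rock, st.2.1, rock :: st.2.2)
  else (st.1, st.2.1 - 1, st.2.2)

-- proof-only intermediate: trimming of the kept list from its (Python) right end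
def trimKept (val : Int) (dist : Int) : List Int → Int → Int
  | [], n => n
  | k :: rest, n => if dist - k < val then trimKept val dist rest (n - 1) else n

-- elements of the final removed set come from the initial set or from the rocks processed
theorem foldA_removed_sub (val : Int) (rocks : List Int) :
    ∀ (prev n : Int) (removed : PySem.Set Int) (x : Int),
      x ∈ (rocks.foldl (stepA val) (prev, n, removed)).2.2 → x ∈ removed ∨ x ∈ rocks := by
  induction rocks with
  | nil => intro prev n removed x h; exact Or.inl h
  | cons rock rest ih =>
    intro prev n removed x h
    simp only [List.foldl_cons, stepA] at h
    split at h
    · rcases ih prev (n - 1) (PySem.Set.add removed rock) x h with h' | h'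
      · rcases (PySem.Set.mem_add _ _ _).1 h' with h'' | h''
        · exact Or.inl h''
        · exact Or.inr (by simp [h''])
      · exact Or.inr (List.mem_cons_of_mem _ h')
    · rcases ih rock n removed x h with h' | h'
      · exact Or.inl h'
      · exact Or.inr (List.mem_cons_of_mem _ h')

-- the removed set only grows
theorem foldA_removed_mono (val : Int) (rocks : List Int) :
    ∀ (prev n : Int) (removed : PySem.Set Int) (x : Int),
      x ∈ removed → x ∈ (rocks.foldl (stepA val) (prev, n, removed)).2.2 := by
  induction rocks with
  | nil => intro prev n removed x h; exact h
  | cons rock rest ih =>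
    intro prev n removed x h
    simp only [List.foldl_cons, stepA]
    split
    · exact ih _ _ _ _ ((PySem.Set.mem_add _ _ _).2 (Or.inl h))
    · exact ih _ _ _ _ h

-- the prev of the kept-list pass is the head of the newly-kept part
theorem foldB_prev_head (val : Int) (rocks : List Int) :
    ∀ (prev n : Int) (kept : List Int),
      ∃ L, (rocks.foldl (stepB val) (prev, n, kept)).2.2 = L ++ kept ∧
           (rocks.foldl (stepB val) (prev, n, kept)).1 = L.headD prev := by
  induction rocks with
  | nil => intro prev n kept; exact ⟨[], by simp⟩
  | cons rock rest ih =>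
    intro prev n kept
    simp only [List.foldl_cons, stepB]
    split
    · rcases ih rock n (rock :: kept) with ⟨L, hL, hp⟩
      refine ⟨L ++ [rock], by simpa using hL, ?_⟩
      rw [hp]; cases L <;> simp
    · exact ih prev (n - 1) kept

-- forward-pass correspondence A ↔ kept-list pass: same prev, same n, and the kept list is
-- exactly the reverse of the rocks not in A's final removed set
theorem fold_corr (val : Int) (rocks : List Int) :
    ∀ (prev n : Int) (removed : PySem.Set Int) (kept : List Int),
      rocks.Nodup → (∀ r ∈ rocks, r ∉ removed) →
      (rocks.foldl (stepA val) (prev, n, removed)).1 = (rocks.foldl (stepB val) (prev, n, kept)).1 ∧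
      (rocks.foldl (stepA val) (prev, n, removed)).2.1 = (rocks.foldl (stepB val) (prev, n, kept)).2.1 ∧
      (rocks.foldl (stepB val) (prev, n, kept)).2.2 =
        (rocks.filter (fun r => !(PySem.Set.contains (rocks.foldl (stepA val) (prev, n, removed)).2.2 r))).reverse ++ kept := by
  induction rocks with
  | nil => intro prev n removed kept _ _; simp
  | cons rock rest ih =>
    intro prev n removed kept hnd hdisj
    have hrock_rem : rock ∉ removed := hdisj rock (List.mem_cons_self ..)
    have hrock_rest : rock ∉ rest := (List.nodup_cons.1 hnd).1
    have hnd' : rest.Nodup := (List.nodup_cons.1 hnd).2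
    simp only [List.foldl_cons, stepA, stepB]
    by_cases hc : rock - prev < val
    · -- rock removed by A, counted by the kept-list pass
      have hnot : ¬ rock - prev ≥ val := by omega
      rw [if_pos hc, if_neg hnot]
      have hdisj' : ∀ r ∈ rest, r ∉ PySem.Set.add removed rock := by
        intro r hr hmem
        rcases (PySem.Set.mem_add _ _ _).1 hmem with h | h
        · exact hdisj r (List.mem_cons_of_mem _ hr) h
        · exact hrock_rest (h ▸ hr)
      obtain ⟨h1, h2, h3⟩ := ih prev (n - 1) (PySem.Set.add removed rock) kept hnd' hdisj'
      refine ⟨h1, h2, ?_⟩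
      have hin : rock ∈ (rest.foldl (stepA val) (prev, n - 1, PySem.Set.add removed rock)).2.2 :=
        foldA_removed_mono val rest _ _ _ _ ((PySem.Set.mem_add _ _ _).2 (Or.inr rfl))
      rw [h3]
      congr 2
      rw [List.filter_cons]
      simp [hin]
    · -- rock kept by both
      have hge : rock - prev ≥ val := by omega
      rw [if_neg hc, if_pos hge]
      obtain ⟨h1, h2, h3⟩ := ih rock n removed (rock :: kept) hnd'
        (fun r hr => hdisj r (List.mem_cons_of_mem _ hr))
      refine ⟨h1, h2, ?_⟩
      have hnotin : rock ∉ (rest.foldl (stepA val) (rock, n, removed)).2.2 := by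
        intro hmem
        rcases foldA_removed_sub val rest _ _ _ _ hmem with h | h
        · exact hrock_rem h
        · exact hrock_rest h
      rw [h3, List.filter_cons]
      simp [hnotin, List.append_assoc]

-- A's backward scan with the removed-set skip is trimming the filtered list
theorem checkBack_eq_trim (val dist : Int) (removed : PySem.Set Int) :
    ∀ (l : List Int) (n : Int),
      checkBack val dist removed l n =
        trimKept val dist (l.filter (fun r => !(PySem.Set.contains removed r))) n := by
  intro l
  induction l with
  | nil => intro n; rfl
  | cons r rest ih =>
    intro n
    rw [checkBack, List.filter_cons]
    by_cases h : r ∈ removed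
    · simp [h, ih]
    · simp [h, trimKept, ih]

-- correspondence kept-list pass ↔ B's counter pass: same prev, same n, and the counter c is
-- exactly what trimming the kept list subtracts
theorem foldBC (val dist : Int) (rocks : List Int) :
    ∀ (prev n : Int) (kept : List Int) (c : Int),
      (∀ m, trimKept val dist kept m = m - c) →
      (rocks.foldl (stepB val) (prev, n, kept)).1 = (rocks.foldl (stepC val dist) (prev, n, c)).1 ∧
      (rocks.foldl (stepB val) (prev, n, kept)).2.1 = (rocks.foldl (stepC val dist) (prev, n, c)).2.1 ∧
      (∀ m, trimKept val dist (rocks.foldl (stepB val) (prev, n, kept)).2.2 m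
              = m - (rocks.foldl (stepC val dist) (prev, n, c)).2.2) := by
  induction rocks with
  | nil => intro prev n kept c h; exact ⟨rfl, rfl, h⟩
  | cons rock rest ih =>
    intro prev n kept c h
    simp only [List.foldl_cons, stepB, stepC]
    by_cases hc : rock - prev < val
    · rw [if_neg (by omega), if_pos hc]
      exact ih prev (n - 1) kept c h
    · rw [if_pos (by omega), if_neg hc]
      refine ih rock n (rock :: kept) _ ?_
      intro m
      by_cases hd : dist - rock < val
      · rw [trimKept, if_pos hd, h, if_pos hd]; omega
      · rw [trimKept, if_neg hd, if_neg hd]; omega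

-- ===== VERDICT (by name: the statement is the Claim_ definition above) =====
theorem check_spec : Claim_equal_check := by
  intro val rocks n dist _ hpre
  unfold Spec_check check check_alt
  obtain ⟨h1, h2, h3⟩ := fold_corr val rocks 0 n PySem.Set.empty [] hpre (by intro r _ h; simp [PySem.Set.empty] at h)
  obtain ⟨g1, g2, g3⟩ := foldBC val dist rocks 0 n [] 0 (by intro m; simp [trimKept])
  obtain ⟨L, hL, hp⟩ := foldB_prev_head val rocks 0 n []
  simp only [List.append_nil] at hL h3
  set sA := rocks.foldl (stepA val) (0, n, (PySem.Set.empty : PySem.Set Int)) with hsA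
  set sB := rocks.foldl (stepB val) (0, n, ([] : List Int)) with hsB
  set sC := rocks.foldl (stepC val dist) (0, n, (0 : Int)) with hsC
  show decide ((if dist - sA.1 < val then checkBack val dist sA.2.2 rocks.reverse sA.2.1 else sA.2.1) ≥ 0)
      = decide (sC.2.1 - sC.2.2 ≥ 0)
  have htrim : trimKept val dist sB.2.2 sB.2.1 = sC.2.1 - sC.2.2 := by rw [g3, g2]
  congr 1
  by_cases hg : dist - sA.1 < val
  · rw [if_pos hg, checkBack_eq_trim, List.filter_reverse, ← h3, h2, htrim]
  · rw [if_neg hg, h2, g2]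
    have hc0 : sC.2.2 = 0 := by
      have h0 := g3 0
      rw [hL] at h0
      cases L with
      | nil => simp [trimKept] at h0; omega
      | cons k rest =>
        have hk : sB.1 = k := by rw [hp]; rfl
        rw [trimKept, if_neg (by rw [h1, hk] at hg; exact hg)] at h0
        omega
    rw [hc0, sub_zero]
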